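-- pv_equiv track=rewrite | github.com/bstanton773/kekambas-125_week4_day3 | whiteboard.py | solution
-- ===== SOURCE A (Python) =====
-- def solution(attendance):
--     is_eligible = True
--     day = 0
--     num_absent = 0
--     while day < len(attendance):
--         if attendance[day] == 'A':
--             num_absent += 1
--             day += 1
--         elif attendance[day] == 'L':
--             days_late = 1
--             day += 1
--             while day < len(attendance) and attendance[day] == 'L':
--                 days_late += 1
--                 if days_late >= 3:
--                     is_eligible = False
--                 day += 1
--         else:
--             day += 1
--     if num_absent > 2:
--         is_eligible = False
--     return is_eligible
-- ===== SOURCE B (Python) =====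
-- def solution(attendance):
--     triples = zip(attendance, attendance[1:], attendance[2:])
--     return attendance.count('A') < 3 and not any(x == y == z == 'L' for x, y, z in triples)
-- ===== Notes on version B (the rewrite author's own statement) =====
-- stated objective: idiomatic
-- what changed: Replaced the indexed while-loop state machine (day cursor, absence counter, nested consecutive-late loop with an eligibility flag) by two stateless scans: count of 'A' and a sliding-window check for three consecutive 'L' via zip of the list with its shifts.
import Mathlib
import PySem

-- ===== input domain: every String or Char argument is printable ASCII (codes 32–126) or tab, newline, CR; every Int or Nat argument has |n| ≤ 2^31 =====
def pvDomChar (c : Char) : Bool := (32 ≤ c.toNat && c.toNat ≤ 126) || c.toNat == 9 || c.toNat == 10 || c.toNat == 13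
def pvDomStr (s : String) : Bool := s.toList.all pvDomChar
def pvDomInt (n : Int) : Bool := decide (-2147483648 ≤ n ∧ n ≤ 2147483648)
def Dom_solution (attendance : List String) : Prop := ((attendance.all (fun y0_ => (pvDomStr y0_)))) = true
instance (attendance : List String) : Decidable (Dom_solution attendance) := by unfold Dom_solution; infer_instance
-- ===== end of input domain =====

-- B replaces A's indexed while-loop state machine by two stateless scans
-- (count of "A" and a sliding-window triple check); same O(n) cost, more idiomatic.

-- ===== PORT A =====
-- inner while loop: 'while day < len(attendance) and attendance[day] == "L": ...'
-- modelled on the remaining suffix; returns the unconsumed suffix and the flag.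
def innerA : List String → Int → Bool → List String × Bool
  | [], _, e => ([], e)
  | x :: rest, d, e =>
    if x = "L" then
      innerA rest (d + 1) (if d + 1 ≥ 3 then false else e)
    else (x :: rest, e)

-- needed by loopA's termination proof
theorem innerA_fst (xs : List String) (d : Int) (e : Bool) :
    (innerA xs d e).1 = xs.dropWhile (fun x => x == "L") := by
  induction xs generalizing d e with
  | nil => simp [innerA, List.dropWhile]
  | cons x rest ih =>
    by_cases h : x = "L"
    · subst h
      simp [innerA, ih, List.dropWhile_cons]
    · have hb : (x == "L") = false := by simp [h]
      simp [innerA, h, List.dropWhile_cons, hb]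

-- outer while loop of A, on the remaining suffix, carrying num_absent and is_eligible
def loopA : List String → Int → Bool → Int × Bool
  | [], n, e => (n, e)
  | x :: rest, n, e =>
    if x = "A" then loopA rest (n + 1) e
    else if x = "L" then
      let r := innerA rest 1 e
      loopA r.1 n r.2
    else loopA rest n e
termination_by xs => xs.length
decreasing_by
  · simp
  · simp only [innerA_fst]
    exact Nat.lt_succ_of_le (List.length_dropWhile_le _ _)
  · simp

def solution (attendance : List String) : Bool :=
  let r := loopA attendance 0 true
  if r.1 > 2 then false else r.2

-- ===== PORT B =====
-- any(x == y == z == 'L' for x, y, z in zip(attendance, attendance[1:], attendance[2:]))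
def tripB (attendance : List String) : Bool :=
  ((attendance.zip (attendance.drop 1)).zip (attendance.drop 2)).any
    (fun t => t.1.1 == t.1.2 && t.1.2 == t.2 && t.2 == "L")

def solution_alt (attendance : List String) : Bool :=
  decide (attendance.count "A" < 3) && !tripB attendance

-- ===== PRECONDITION & SPEC =====
def Spec_solution (attendance : List String) (out : Bool) : Prop := out = solution_alt attendance
instance (attendance : List String) (out : Bool) : Decidable (Spec_solution attendance out) := by unfold Spec_solution; infer_instance

-- ===== CLAIM (what is proved, stated in full; the proofs are below) =====
def Claim_equal_solution : Prop := ∀ (attendance : List String), Dom_solution attendance → Spec_solution attendance (solution attendance)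

-- ===== LEMMAS AND PROOFS =====

-- three consecutive "L" somewhere, in recursive form (proof-side characterisation)
def hasRun3 : List String → Bool
  | a :: b :: c :: t => (a == "L" && b == "L" && c == "L") || hasRun3 (b :: c :: t)
  | _ => false

theorem tripB_eq_hasRun3 (xs : List String) : tripB xs = hasRun3 xs := by
  induction xs using hasRun3.induct with
  | case1 a b c t ih =>
    simp only [tripB, List.drop, List.zip_cons_cons, List.any_cons] at *
    rw [ih, hasRun3]
    congr 1
    by_cases hc : c = "L"
    · subst hc
      by_cases hb : b = "L"
      · subst hb
        by_cases ha : a = "L"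
        · subst ha; rfl
        · have h : (a == "L") = false := by simp [ha]
          simp [h]
      · have h : (b == "L") = false := by simp [hb]
        simp [h]
    · have h : (c == "L") = false := by simp [hc]
      simp [h]
  | case2 xs h => cases xs with
    | nil => rfl
    | cons a t =>
      cases t with
      | nil => rfl
      | cons b u =>
        cases u with
        | nil => rfl
        | cons c v => exact absurd rfl (h a b c v)

theorem innerA_spec (xs : List String) (d : Int) (e : Bool) :
    innerA xs d e = (xs.dropWhile (fun x => x == "L"),
      e && !decide (1 ≤ (xs.takeWhile (fun x => x == "L")).length ∧
             3 ≤ d + ((xs.takeWhile (fun x => x == "L")).length : Int))) := by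
  induction xs generalizing d e with
  | nil => simp [innerA]
  | cons x rest ih =>
    by_cases h : x = "L"
    · subst h
      rw [show innerA ("L" :: rest) d e
            = innerA rest (d + 1) (if d + 1 ≥ 3 then false else e) from if_pos rfl,
          ih]
      simp only [List.dropWhile_cons, List.takeWhile_cons, beq_self_eq_true, if_true,
        List.length_cons]
      refine Prod.ext rfl ?_
      cases e with
      | false => by_cases h3 : d + 1 ≥ 3 <;> simp [h3]
      | true =>
        by_cases h3 : d + 1 ≥ 3
        · simp only [if_pos h3, Bool.false_and, Bool.true_and]
          symm
          rw [Bool.not_eq_false', decide_eq_true_eq]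
          refine ⟨by omega, by push_cast; omega⟩
        · simp only [if_neg h3, Bool.true_and]
          congr 1
          rw [decide_eq_decide]
          constructor
          · rintro ⟨h1, h2⟩
            refine ⟨by omega, by push_cast; omega⟩
          · rintro ⟨h1, h2⟩
            push_cast at h2
            refine ⟨by omega, by omega⟩
    · have hb : (x == "L") = false := by simp [h]
      rw [show innerA (x :: rest) d e = (x :: rest, e) from if_neg h]
      simp [List.dropWhile_cons, List.takeWhile_cons, hb]

theorem hasRun3_L_cons (xs : List String) :
    hasRun3 ("L" :: xs)
      = (decide (2 ≤ (xs.takeWhile (fun x => x == "L")).length)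
         || hasRun3 (xs.dropWhile (fun x => x == "L"))) := by
  induction xs with
  | nil => rfl
  | cons y ys ih =>
    by_cases hy : y = "L"
    · subst hy
      cases ys with
      | nil => rfl
      | cons c t =>
        rw [hasRun3, ih]
        by_cases hc : c = "L"
        · subst hc
          simp
        · have hb : (c == "L") = false := by simp [hc]
          simp [List.takeWhile_cons, List.dropWhile_cons, hb]
    · have hb : (y == "L") = false := by simp [hy]
      cases ys with
      | nil => simp [List.takeWhile_cons, List.dropWhile_cons, hb]; rfl
      | cons c t =>
        rw [hasRun3]
        simp [List.takeWhile_cons, List.dropWhile_cons, hb]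

theorem count_takeWhile_L (xs : List String) :
    (xs.takeWhile (fun x => x == "L")).count "A" = 0 := by
  rw [List.count_eq_zero]
  intro hmem
  have := List.mem_takeWhile_imp hmem
  simp at this

theorem count_dropWhile_L (xs : List String) :
    ((xs.dropWhile (fun x => x == "L")).count "A") = xs.count "A" := by
  conv_rhs => rw [← List.takeWhile_append_dropWhile (p := fun x => x == "L") (l := xs)]
  rw [List.count_append, count_takeWhile_L]
  omega

theorem hasRun3_cons_ne (x : String) (hx : (x == "L") = false) (rest : List String) :
    hasRun3 (x :: rest) = hasRun3 rest := by
  cases rest with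
  | nil => rfl
  | cons b u =>
    cases u with
    | nil => rfl
    | cons c v =>
      rw [hasRun3]
      simp [hx]

theorem loopA_spec : ∀ (m : Nat) (xs : List String), xs.length ≤ m → ∀ (n : Int) (e : Bool),
    loopA xs n e = (n + (xs.count "A" : Int), e && !hasRun3 xs) := by
  intro m
  induction m with
  | zero =>
    intro xs hlen n e
    have : xs = [] := List.eq_nil_of_length_eq_zero (Nat.le_zero.mp hlen)
    subst this
    simp [loopA, hasRun3]
  | succ m ih =>
    intro xs hlen n e
    cases xs with
    | nil => simp [loopA, hasRun3]
    | cons x rest =>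
      simp only [List.length_cons, Nat.succ_le_succ_iff] at hlen
      by_cases hA : x = "A"
      · rw [loopA, if_pos hA, ih rest hlen,
            hasRun3_cons_ne x (by simp [hA]) rest]
        subst hA
        simp [List.count_cons]
        ring
      · by_cases hL : x = "L"
        · subst hL
          rw [loopA, if_neg hA, if_pos rfl]
          simp only [innerA_spec]
          have hdl : (rest.dropWhile (fun x => x == "L")).length ≤ m :=
            Nat.le_trans (List.length_dropWhile_le _ _) hlen
          rw [ih _ hdl, count_dropWhile_L, hasRun3_L_cons]
          refine Prod.ext ?_ ?_
          · simp [List.count_cons]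
          · simp only [Bool.not_or, ← Bool.and_assoc]
            congr 2
            rw [Bool.not_inj_iff, decide_eq_decide]
            omega
        · rw [loopA, if_neg hA, if_neg hL, ih rest hlen,
              hasRun3_cons_ne x (by simp [hL]) rest]
          simp [List.count_cons, hA]

-- ===== VERDICT (by name: the statement is the Claim_ definition above) =====
theorem solution_spec : Claim_equal_solution := by
  intro attendance _
  unfold Spec_solution solution solution_alt
  rw [loopA_spec attendance.length attendance (Nat.le_refl _), tripB_eq_hasRun3]
  by_cases hc : (attendance.count "A") < 3
  · have h2 : ¬ ((0:Int) + (attendance.count "A" : Int) > 2) := by omega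
    rw [if_neg h2]
    simp [hc]
  · have h2 : ((0:Int) + (attendance.count "A" : Int) > 2) := by omega
    rw [if_pos h2]
    simp [hc]
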